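-- pv_equiv track=rewrite | github.com/ramonmedeiros/googleFoobar | level2/solution.py | solution
-- ===== SOURCE A (Python) =====
-- def solution(x, y):
--     # x is line, y is column
--     rowValue = calculateRow(y)
--
--     res = rowValue
--     s = y + 1
--     for i in range(x-1):
--         res += s
--         s += 1
--     return str(res)
--
-- def calculateRow(row):
--     res = 1
--     s = 1
--     for i in range(row-1):
--         res += s
--         s += 1
--     return res
-- ===== SOURCE B (Python) =====
-- def solution(x, y):
--     # closed form: triangular numbers instead of the two accumulation loops
--     a = max(y - 1, 0)
--     b = max(x - 1, 0)
--     return str(1 + a * (a + 1) // 2 + b * (y + 1) + b * (b - 1) // 2)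
-- ===== Notes on version B (the rewrite author's own statement) =====
-- stated objective: faster
-- what changed: Replaced both accumulation loops (calculateRow's loop and the main loop over range(x-1)) with a closed-form triangular-number formula computed in O(1).
import Mathlib
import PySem

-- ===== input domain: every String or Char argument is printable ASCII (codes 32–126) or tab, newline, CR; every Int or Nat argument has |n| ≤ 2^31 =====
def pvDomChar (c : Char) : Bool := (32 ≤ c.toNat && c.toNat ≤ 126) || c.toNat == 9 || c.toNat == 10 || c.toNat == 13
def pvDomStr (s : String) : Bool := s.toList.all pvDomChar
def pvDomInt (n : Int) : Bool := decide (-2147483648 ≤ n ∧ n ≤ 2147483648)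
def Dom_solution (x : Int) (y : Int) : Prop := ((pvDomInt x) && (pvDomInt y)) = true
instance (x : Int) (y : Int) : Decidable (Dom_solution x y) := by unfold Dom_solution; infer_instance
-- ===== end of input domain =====

-- B replaces A's two accumulation loops by a closed-form triangular-number formula (O(1) vs O(x+y)).

-- ===== PORT A =====
def calculateRow (row : Int) : Int :=
  let st := (PySem.List.pyRange 0 (row - 1) 1).foldl
    (fun (p : Int × Int) _ => (p.1 + p.2, p.2 + 1)) (1, 1)
  st.1

def solution (x : Int) (y : Int) : String :=
  let rowValue := calculateRow y
  let st := (PySem.List.pyRange 0 (x - 1) 1).foldl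
    (fun (p : Int × Int) _ => (p.1 + p.2, p.2 + 1)) (rowValue, y + 1)
  PySem.Int.toStr st.1

-- ===== PORT B =====
def solution_alt (x : Int) (y : Int) : String :=
  let a := max (y - 1) 0
  let b := max (x - 1) 0
  PySem.Int.toStr (1 + a * (a + 1) / 2 + b * (y + 1) + b * (b - 1) / 2)

-- ===== PRECONDITION & SPEC =====
def Spec_solution (x : Int) (y : Int) (out : String) : Prop := out = solution_alt x y
instance (x : Int) (y : Int) (out : String) : Decidable (Spec_solution x y out) := by unfold Spec_solution; infer_instance

-- ===== CLAIM (what is proved, stated in full; the proofs are below) =====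
def Claim_equal_solution : Prop := ∀ (x : Int) (y : Int), Dom_solution x y → Spec_solution x y (solution x y)

-- ===== LEMMAS AND PROOFS =====

-- The accumulation loop over any list of length k turns (r, s) into
-- (r + k*s + k*(k-1)/2, s + k).
theorem pv_fold_step {α : Type} (l : List α) (r s : Int) :
    l.foldl (fun (p : Int × Int) _ => (p.1 + p.2, p.2 + 1)) (r, s)
      = (r + (l.length : Int) * s + (l.length : Int) * ((l.length : Int) - 1) / 2,
         s + (l.length : Int)) := by
  induction l generalizing r s with
  | nil => simp
  | cons a t ih =>
      simp only [List.foldl_cons, List.length_cons, ih]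
      rw [Prod.mk.injEq]
      push_cast
      set n : Int := (t.length : Int) with hn
      have hn0 : 0 ≤ n := by simp [hn]
      obtain ⟨k, hk⟩ : Even ((n - 1) * n) := by
        have := Int.even_mul_succ_self (n - 1); simpa using this
      have e0 : (n + 1) * s = n * s + s := by ring
      have e1 : n * (s + 1) = n * s + n := by ring
      have e2 : (n + 1) * ((n + 1) - 1) = (n - 1) * n + 2 * n := by ring
      have e3 : n * (n - 1) = (n - 1) * n := by ring
      constructor <;> omega

theorem pv_loop_value (n r s : Int) :
    ((PySem.List.pyRange 0 n 1).foldl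
      (fun (p : Int × Int) _ => (p.1 + p.2, p.2 + 1)) (r, s)).1
      = r + (max n 0) * s + (max n 0) * ((max n 0) - 1) / 2 := by
  rw [pv_fold_step]
  have h : ((PySem.List.pyRange 0 n 1).length : Int) = max n 0 := by
    rw [PySem.List.length_pyRange_one]; omega
  rw [h]

-- ===== VERDICT (by name: the statement is the Claim_ definition above) =====
theorem solution_spec : Claim_equal_solution := by
  intro x y _
  unfold Spec_solution solution solution_alt calculateRow
  simp only [pv_loop_value]
  congr 1
  set a := max (y - 1) 0 with ha
  set b := max (x - 1) 0 with hb
  obtain ⟨k, hk⟩ : Even (a * (a + 1)) := Int.even_mul_succ_self a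
  have e1 : a * (a - 1) = a * (a + 1) - 2 * a := by ring
  omega
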